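-- pv_equiv track=rewrite | github.com/nmmarzano/advent-of-code-2020 | Day 1/part_two.py | find_sum_recursive
-- ===== SOURCE A (Python) =====
-- def find_sum_recursive(nums, target, quantity):
--     if quantity  == 1:
--         if target in nums:
--             return [target]
--         else:
--             return None
--     else:
--         members = []
--         for i in range(len(nums) - 1):
--             if nums[i] > target:
--                 continue
--             members = find_sum_recursive(nums[i + 1:], target - nums[i], quantity - 1)
--             if not members == None:
--                 members.append(nums[i])
--                 return members
--         if members == None or members == []:
--             return None
-- ===== SOURCE B (Python) =====
-- def find_sum_recursive(nums, target, quantity):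
--     # Iterative depth-first search with an explicit stack of (index, remaining)
--     # frames instead of recursion over list slices; a last-occurrence hash map
--     # built once makes the innermost membership test a single dict lookup.
--     n = len(nums)
--     last = {}
--     for k, v in enumerate(nums):
--         last[v] = k
--     if quantity == 1:
--         return [target] if target in last else None
--     if quantity < 1:
--         return None
--     depth = quantity - 1
--     stack = [(0, target)]
--     while stack:
--         i, rem = stack[-1]
--         if i >= n - 1:
--             stack.pop()
--             if stack:
--                 j, s = stack.pop()
--                 stack.append((j + 1, s))
--             continue
--         v = nums[i]
--         if v > rem:
--             stack[-1] = (i + 1, rem)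
--             continue
--         r = rem - v
--         if len(stack) == depth:
--             if last.get(r, -1) > i:
--                 return [r] + [nums[j] for j, _ in reversed(stack)]
--             stack[-1] = (i + 1, rem)
--         else:
--             stack.append((i + 1, r))
--     return None
-- ===== Notes on version B (the rewrite author's own statement) =====
-- stated objective: alternative
-- what changed: B replaces A's recursive slice-and-backtrack search (a fresh list slice and a linear membership scan per level) by a single while loop over an explicit stack of (index, remaining) frames on the original list, with a last-occurrence hash map built once so the innermost membership test is one dict lookup.
import Mathlib
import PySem

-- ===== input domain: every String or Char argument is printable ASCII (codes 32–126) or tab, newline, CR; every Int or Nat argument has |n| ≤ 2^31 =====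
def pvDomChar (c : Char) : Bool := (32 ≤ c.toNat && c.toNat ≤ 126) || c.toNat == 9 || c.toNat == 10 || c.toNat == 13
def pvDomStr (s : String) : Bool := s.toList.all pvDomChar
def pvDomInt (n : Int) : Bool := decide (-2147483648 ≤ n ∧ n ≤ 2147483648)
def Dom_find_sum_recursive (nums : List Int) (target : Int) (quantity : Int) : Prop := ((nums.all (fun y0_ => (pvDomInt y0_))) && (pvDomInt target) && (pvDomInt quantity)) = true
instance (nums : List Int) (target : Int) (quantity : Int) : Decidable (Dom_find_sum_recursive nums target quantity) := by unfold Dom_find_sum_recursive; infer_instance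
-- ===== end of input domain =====

-- B replaces A's slice-and-recurse backtracking by a single while loop over an
-- explicit stack of (index, remaining) frames, with a last-occurrence hash map
-- built once so the innermost membership test is one dict lookup (objective:
-- alternative — an iterative reformulation; no speed claim is made).

-- ===== PORT A =====
-- Literal port of A.  The 'for i in range(len(nums) - 1)' loop is the index
-- recursion fsrA_loopF (j is a structural countdown of the remaining iterations,
-- started at len(nums)-1; it only makes the recursion structural); the slice
-- nums[i+1:] (index i+1 ≥ 0, in range) is exactly List.drop (i+1); 'continue'
-- and the post-loop 'return None' are the 'none' tails; members.append(nums[i])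
-- followed by return is 'some (m ++ [nums[i]])'.  fuel bounds the recursion
-- depth (unreachable 0: each nested call gets a strictly shorter list).
def fsrA_loopF (rec : List Int → Int → Int → Option (List Int)) (nums : List Int) (t q : Int) : Nat → Nat → Option (List Int)
  | _, 0 => none
  | i, j + 1 =>
    if h : i < nums.length - 1 then
      if nums[i]'(by omega) > t then fsrA_loopF rec nums t q (i + 1) j
      else
        match rec (nums.drop (i + 1)) (t - nums[i]'(by omega)) (q - 1) with
        | some m => some (m ++ [nums[i]'(by omega)])
        | none => fsrA_loopF rec nums t q (i + 1) j
    else none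

def fsrA_go : Nat → List Int → Int → Int → Option (List Int)
  | 0, _, _, _ => none
  | fuel + 1, nums, t, q =>
    if q = 1 then (if t ∈ nums then some [t] else none)
    else fsrA_loopF (fsrA_go fuel) nums t q 0 (nums.length - 1)

def find_sum_recursive (nums : List Int) (target : Int) (quantity : Int) : Option (List Int) :=
  fsrA_go (nums.length + 1) nums target quantity

-- ===== PORT B =====
-- Port of Source B.  'last' is the dict built by the enumerate loop (insert
-- overwrites, so each value maps to its last index).  The while loop over the
-- explicit stack is fsrB_run; the stack is kept top-first (Python's stack[-1]
-- is the head), so Python's reversed(stack) is the list itself; 'i >= n - 1'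
-- over Python ints is 'n ≤ i + 1' over Nat; nums[i] and nums[j] (indices the
-- loop keeps in range) are nums.getD _ 0; fuel only bounds the number of loop
-- iterations (the chosen fuel is proved sufficient below), 'return None' on
-- loop exit and the fuel-0 default coincide.
def fsrB_lastIdx (nums : List Int) : PySem.Dict Int Int :=
  (PySem.List.enumerate nums).foldl (fun d p => d.insert p.2 p.1) PySem.Dict.empty

-- 'stack.pop(); if stack: j, s = stack.pop(); stack.append((j + 1, s))'
def fsrB_pop : List (Nat × Int) → List (Nat × Int)
  | [] => []
  | (j, s) :: rest' => (j + 1, s) :: rest'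

def fsrB_run (nums : List Int) (last : PySem.Dict Int Int) (depth : Nat) : Nat → List (Nat × Int) → Option (List Int)
  | 0, _ => none
  | _ + 1, [] => none
  | fuel + 1, (i, rem) :: rest =>
    if nums.length ≤ i + 1 then fsrB_run nums last depth fuel (fsrB_pop rest)
    else
      if nums.getD i 0 > rem then fsrB_run nums last depth fuel ((i + 1, rem) :: rest)
      else
        if rest.length + 1 = depth then
          if (i : Int) < last.getD (rem - nums.getD i 0) (-1) then
            some ((rem - nums.getD i 0) :: ((i, rem) :: rest).map (fun p => nums.getD p.1 0))
          else fsrB_run nums last depth fuel ((i + 1, rem) :: rest)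
        else fsrB_run nums last depth fuel ((i + 1, rem - nums.getD i 0) :: (i, rem) :: rest)

def find_sum_recursive_alt (nums : List Int) (target : Int) (quantity : Int) : Option (List Int) :=
  let last := fsrB_lastIdx nums
  if quantity = 1 then (if last.contains target then some [target] else none)
  else if quantity < 1 then none
  else fsrB_run nums last (quantity - 1).toNat ((nums.length + 2) ^ (nums.length + 2)) [(0, target)]

-- ===== PRECONDITION & SPEC =====
def Spec_find_sum_recursive (nums : List Int) (target : Int) (quantity : Int) (out : Option (List Int)) : Prop := out = find_sum_recursive_alt nums target quantity
instance (nums : List Int) (target : Int) (quantity : Int) (out : Option (List Int)) : Decidable (Spec_find_sum_recursive nums target quantity out) := by unfold Spec_find_sum_recursive; infer_instance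

-- ===== CLAIM (what is proved, stated in full; the proofs are below) =====
def Claim_equal_find_sum_recursive : Prop := ∀ (nums : List Int) (target : Int) (quantity : Int), Dom_find_sum_recursive nums target quantity → Spec_find_sum_recursive nums target quantity (find_sum_recursive nums target quantity)

-- ===== LEMMAS AND PROOFS =====

-- Common reference shape: A's search written structurally on the suffix list.
mutual
def fsrSpec (xs : List Int) (t : Int) (q : Int) : Option (List Int) :=
  if q = 1 then (if t ∈ xs then some [t] else none) else fsrLoopS xs t q
termination_by (xs.length, 1)

def fsrLoopS : List Int → Int → Int → Option (List Int)
  | [], _, _ => none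
  | [_], _, _ => none
  | v :: b :: rest, t, q =>
    if v > t then fsrLoopS (b :: rest) t q
    else
      match fsrSpec (b :: rest) (t - v) (q - 1) with
      | some m => some (m ++ [v])
      | none => fsrLoopS (b :: rest) t q
termination_by xs _ _ => (xs.length, 0)
decreasing_by
  · exact Prod.Lex.left _ _ (by simp)
  · exact Prod.Lex.left _ _ (by simp)
  · exact Prod.Lex.left _ _ (by simp)
end

theorem mem_drop_iff' (l : List Int) (t : Int) (s : Nat) :
    t ∈ l.drop s ↔ ∃ (k : Nat) (h : k < l.length), s ≤ k ∧ l[k] = t := by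
  constructor
  · intro hm
    rw [List.mem_iff_getElem] at hm
    obtain ⟨j, hj, he⟩ := hm
    exact ⟨s + j, by simp [List.length_drop] at hj ⊢; omega, by omega,
      by rw [← List.getElem_drop]; exact he⟩
  · rintro ⟨k, hk, hsk, he⟩
    rw [List.mem_iff_getElem]
    refine ⟨k - s, by simp [List.length_drop]; omega, ?_⟩
    rw [List.getElem_drop]
    exact (getElem_congr rfl (by omega : s + (k - s) = k) (by omega)).trans he

theorem lastIdx_snoc (xs : List Int) (x : Int) :
    fsrB_lastIdx (xs ++ [x]) = (fsrB_lastIdx xs).insert x (xs.length : Int) := by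
  simp [fsrB_lastIdx, PySem.List.enumerate_append, PySem.List.enumerate_cons,
    PySem.List.enumerate_nil, List.foldl_append]

-- Characterisation of the last-occurrence dict.
theorem lastIdx_char (nums : List Int) (t : Int) :
    ((fsrB_lastIdx nums).get? t = none ∧ t ∉ nums) ∨
    (∃ (k : Nat) (h : k < nums.length), (fsrB_lastIdx nums).get? t = some (k : Int) ∧
      nums[k] = t ∧ ∀ (m : Nat) (hm : m < nums.length), k < m → nums[m] ≠ t) := by
  induction nums using List.reverseRecOn with
  | nil => left; exact ⟨by simp [fsrB_lastIdx, PySem.List.enumerate_nil, PySem.Dict.get?_empty], by simp⟩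
  | append_singleton xs x ih =>
    rw [lastIdx_snoc]
    by_cases hx : t = x
    · right
      refine ⟨xs.length, by simp, ?_, ?_, ?_⟩
      · rw [hx, PySem.Dict.get?_insert_self]
      · simp [hx]
      · intro m hm hlt; simp at hm; omega
    · rw [PySem.Dict.get?_insert_of_ne _ _ (fun h => hx h)]
      rcases ih with ⟨hn, hmem⟩ | ⟨k, hk, hg, he, hmax⟩
      · left
        exact ⟨hn, by simp [hmem, hx]⟩
      · right
        refine ⟨k, by simp; omega, hg, ?_, ?_⟩
        · rw [List.getElem_append_left hk]; exact he
        · intro m hm hlt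
          simp at hm
          rcases Nat.lt_or_ge m xs.length with h' | h'
          · rw [List.getElem_append_left h']
            exact hmax m h' hlt
          · have : m = xs.length := by omega
            subst this
            rw [List.getElem_append_right (by omega)]
            simp only [Nat.sub_self, List.getElem_cons_zero]
            exact fun h => hx h.symm

-- B's dict membership is list membership.
theorem lastIdx_contains (nums : List Int) (t : Int) :
    (fsrB_lastIdx nums).contains t = true ↔ t ∈ nums := by
  rw [PySem.Dict.contains_eq_isSome_get?]
  rcases lastIdx_char nums t with ⟨hn, hmem⟩ | ⟨k, hk, hg, he, _⟩
  · simp [hn, hmem]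
  · simp [hg]
    exact he ▸ List.getElem_mem hk

-- B's innermost test: the last occurrence of x is past i  ⟺  x ∈ nums[i+1:].
theorem lastIdx_gt (nums : List Int) (x : Int) (i : Nat) :
    ((i : Int) < (fsrB_lastIdx nums).getD x (-1)) ↔ x ∈ nums.drop (i + 1) := by
  rcases lastIdx_char nums x with ⟨hn, hmem⟩ | ⟨k, hk, hg, he, hmax⟩
  · rw [PySem.Dict.getD_eq_get?_getD, hn]
    simp only [Option.getD_none]
    constructor
    · intro h; omega
    · intro h; exact absurd (List.mem_of_mem_drop h) hmem
  · rw [PySem.Dict.getD_eq_get?_getD, hg]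
    simp only [Option.getD_some]
    constructor
    · intro h
      exact (mem_drop_iff' nums x (i + 1)).mpr ⟨k, hk, by omega, he⟩
    · intro h
      obtain ⟨m, hm, hsm, hem⟩ := (mem_drop_iff' nums x (i + 1)).mp h
      have : ¬ k < m := fun hlt => hmax m hm hlt hem
      omega

theorem drop_short (nums : List Int) (i : Nat) (h : ¬ i < nums.length - 1) (t q : Int) :
    fsrLoopS (nums.drop i) t q = none := by
  have hlen : (nums.drop i).length ≤ 1 := by simp [List.length_drop]; omega
  rcases hd : nums.drop i with _ | ⟨a, _ | ⟨b, r⟩⟩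
  · rw [fsrLoopS]
  · rw [fsrLoopS]
  · rw [hd] at hlen; simp at hlen

-- A's loop equals the structural loop on the dropped suffix.
theorem loopFA_eq (fuel : Nat) (nums : List Int)
    (hrec : ∀ (xs : List Int) (t q : Int), xs.length < fuel → fsrA_go fuel xs t q = fsrSpec xs t q)
    (hfl : nums.length ≤ fuel) :
    ∀ (j i : Nat) (t q : Int), j = nums.length - 1 - i →
      fsrA_loopF (fsrA_go fuel) nums t q i j = fsrLoopS (nums.drop i) t q := by
  intro j
  induction j with
  | zero =>
    intro i t q hj
    rw [fsrA_loopF, drop_short nums i (by omega)]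
  | succ j ih =>
    intro i t q hj
    have h : i < nums.length - 1 := by omega
    have hi : i < nums.length := by omega
    have hi1 : i + 1 < nums.length := by omega
    have hd : nums.drop i = nums[i] :: nums.drop (i + 1) := List.drop_eq_getElem_cons hi
    have hd2 : nums.drop (i + 1) = nums[i + 1] :: nums.drop (i + 2) := List.drop_eq_getElem_cons hi1
    rw [fsrA_loopF, hd, hd2, fsrLoopS, ← hd2]
    simp only [dif_pos h]
    by_cases hv : nums[i] > t
    · rw [if_pos hv, if_pos hv]
      exact ih (i + 1) t q (by omega)
    · rw [if_neg hv, if_neg hv]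
      have hrec' : fsrA_go fuel (nums.drop (i + 1)) (t - nums[i]) (q - 1)
          = fsrSpec (nums.drop (i + 1)) (t - nums[i]) (q - 1) :=
        hrec _ _ _ (by simp [List.length_drop]; omega)
      rw [hrec']
      rcases hm : fsrSpec (nums.drop (i + 1)) (t - nums[i]) (q - 1) with _ | m
      · exact ih (i + 1) t q (by omega)
      · rfl

theorem goA_eq (fuel : Nat) : ∀ (nums : List Int) (t q : Int), nums.length < fuel →
    fsrA_go fuel nums t q = fsrSpec nums t q := by
  induction fuel with
  | zero => intro nums t q h; omega
  | succ fuel ih =>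
    intro nums t q h
    rw [fsrA_go, fsrSpec]
    by_cases hq : q = 1
    · rw [if_pos hq, if_pos hq]
    · rw [if_neg hq, if_neg hq]
      have := loopFA_eq fuel nums ih (by omega) (nums.length - 1) 0 t q (by omega)
      simpa using this

theorem A_eq_spec (nums : List Int) (t q : Int) : find_sum_recursive nums t q = fsrSpec nums t q :=
  goA_eq (nums.length + 1) nums t q (by omega)

-- fsrSpec / fsrLoopS vanish for quantity < 1 (the base case is unreachable).
theorem loopS_nonpos : ∀ (k : Nat) (xs : List Int), xs.length ≤ k → ∀ (t q : Int), q < 1 →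
    fsrLoopS xs t q = none := by
  intro k
  induction k with
  | zero =>
    intro xs hk t q hq
    have : xs = [] := List.eq_nil_of_length_eq_zero (by omega)
    subst this; rw [fsrLoopS]
  | succ k ih =>
    intro xs hk t q hq
    match xs with
    | [] => rw [fsrLoopS]
    | [_] => rw [fsrLoopS]
    | v :: b :: rest =>
      rw [fsrLoopS]
      have hbr : (b :: rest).length ≤ k := by simp at hk ⊢; omega
      by_cases hv : v > t
      · rw [if_pos hv]; exact ih _ hbr t q hq
      · rw [if_neg hv, fsrSpec, if_neg (by omega : ¬ q - 1 = 1), ih _ hbr (t - v) (q - 1) (by omega)]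
        exact ih _ hbr t q hq

-- ======== B-side: the stack semantics ========

-- Value of the parent continuations: X is the (already computed) outcome of the
-- subtree rooted at the top frame; each parent either appends its pick (early
-- return) or resumes its own loop at the next index.
def fsrComb (nums : List Int) (quantity : Int) : Option (List Int) → List (Nat × Int) → Option (List Int)
  | X, [] => X
  | some ms, (j, _) :: rest => fsrComb nums quantity (some (ms ++ [nums.getD j 0])) rest
  | none, (j, s) :: rest => fsrComb nums quantity (fsrLoopS (nums.drop (j + 1)) s (quantity - rest.length)) rest

def fsrG (nums : List Int) (quantity : Int) : List (Nat × Int) → Option (List Int)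
  | [] => none
  | (i, r) :: rest => fsrComb nums quantity (fsrLoopS (nums.drop i) r (quantity - rest.length)) rest

theorem comb_some (nums : List Int) (quantity : Int) :
    ∀ (rest : List (Nat × Int)) (ms : List Int),
      fsrComb nums quantity (some ms) rest = some (ms ++ rest.map (fun p => nums.getD p.1 0)) := by
  intro rest
  induction rest with
  | nil => intro ms; simp [fsrComb]
  | cons p t ih =>
    intro ms
    obtain ⟨j, s⟩ := p
    rw [fsrComb, ih]
    simp

-- Well-formed stacks: indices strictly decrease towards the bottom and stay in range.
def fsrWF (nums : List Int) (S : List (Nat × Int)) : Prop :=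
  S.Pairwise (fun a b => b.1 < a.1) ∧ ∀ f ∈ S, f.1 + 1 ≤ nums.length

theorem fsrLen_aux : ∀ (S : List (Nat × Int)) (i : Nat) (r : Int),
    ((i, r) :: S).Pairwise (fun a b => b.1 < a.1) → ((i, r) :: S).length ≤ i + 1 := by
  intro S
  induction S with
  | nil => intro i r _; simp
  | cons p t ih =>
    intro i r hp
    obtain ⟨j, s⟩ := p
    have hji : j < i := (List.pairwise_cons.mp hp).1 (j, s) (by simp)
    have := ih j s (List.pairwise_cons.mp hp).2
    simp at this ⊢
    omega

theorem fsrLen (nums : List Int) (S : List (Nat × Int)) (h : fsrWF nums S) :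
    S.length ≤ nums.length := by
  match S with
  | [] => simp
  | (i, r) :: t =>
    have h1 := fsrLen_aux t i r h.1
    have h2 := h.2 (i, r) (by simp)
    omega

-- The Horner weight of a stack and the rank used for fuel accounting.
def fsrH (n : Nat) : List (Nat × Int) → Nat
  | [] => 0
  | (i, _) :: t => (i + 1) + (n + 1) * fsrH n t

def fsrRank (n : Nat) (S : List (Nat × Int)) : Nat := (n + 1) ^ (n - S.length) * fsrH n S

theorem fsrH_lt (n : Nat) : ∀ (S : List (Nat × Int)),
    (∀ f ∈ S, f.1 + 1 ≤ n) → fsrH n S + 1 ≤ (n + 1) ^ S.length := by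
  intro S
  induction S with
  | nil => intro _; simp [fsrH]
  | cons p t ih =>
    intro hb
    obtain ⟨i, r⟩ := p
    have h1 : i + 1 ≤ n := hb (i, r) (by simp)
    have h2 := ih (fun f hf => hb f (by simp [hf]))
    rw [fsrH]
    simp only [List.length_cons, pow_succ]
    nlinarith

theorem fsrRank_lt (nums : List Int) (S : List (Nat × Int)) (h : fsrWF nums S) :
    fsrRank nums.length S + 1 ≤ (nums.length + 1) ^ nums.length := by
  set n := nums.length with hn
  have hL : S.length ≤ n := fsrLen nums S h
  have hH := fsrH_lt n S (fun f hf => h.2 f hf)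
  have hpow : (n + 1) ^ (n - S.length) * (n + 1) ^ S.length = (n + 1) ^ n := by
    rw [← pow_add]; congr 1; omega
  have h1 : (1:Nat) ≤ (n + 1) ^ (n - S.length) := Nat.one_le_pow _ _ (by omega)
  calc fsrRank n S + 1 ≤ (n + 1) ^ (n - S.length) * fsrH n S + (n + 1) ^ (n - S.length) := by
        unfold fsrRank; omega
    _ = (n + 1) ^ (n - S.length) * (fsrH n S + 1) := by ring
    _ ≤ (n + 1) ^ (n - S.length) * (n + 1) ^ S.length := by
        exact Nat.mul_le_mul_left _ hH
    _ = (n + 1) ^ n := hpow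

-- Rank strictly increases at each loop step.
theorem rank_step_incr (n i : Nat) (rem : Int) (rest : List (Nat × Int)) :
    fsrRank n ((i, rem) :: rest) + 1 ≤ fsrRank n ((i + 1, rem) :: rest) := by
  unfold fsrRank fsrH
  have h1 : (1:Nat) ≤ (n + 1) ^ (n - ((i, rem) :: rest).length) := Nat.one_le_pow _ _ (by omega)
  simp only [List.length_cons] at *
  nlinarith

theorem rank_step_push (n i : Nat) (rem r' : Int) (rest : List (Nat × Int))
    (hL : rest.length + 2 ≤ n) :
    fsrRank n ((i, rem) :: rest) + 1 ≤ fsrRank n ((i + 1, r') :: (i, rem) :: rest) := by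
  unfold fsrRank
  simp only [fsrH, List.length_cons]
  have he : n - (rest.length + 1) = (n - (rest.length + 1 + 1)) + 1 := by omega
  rw [he, pow_succ]
  have h2 : 0 < (n + 1) ^ (n - (rest.length + 1 + 1)) * (i + 1 + 1) := by positivity
  nlinarith [h2]

theorem rank_step_pop (n i j : Nat) (rem s : Int) (rest : List (Nat × Int))
    (hin : i + 1 ≤ n) (hL : rest.length + 2 ≤ n) :
    fsrRank n ((i, rem) :: (j, s) :: rest) + 1 ≤ fsrRank n ((j + 1, s) :: rest) := by
  unfold fsrRank
  simp only [fsrH, List.length_cons]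
  have he : n - (rest.length + 1) = (n - (rest.length + 1 + 1)) + 1 := by omega
  rw [he, pow_succ]
  obtain ⟨m, hm⟩ : ∃ m, n = i + 1 + m := ⟨n - i - 1, by omega⟩
  subst hm
  have h2 : 0 < (i + 1 + m + 1) ^ (i + 1 + m - (rest.length + 1 + 1)) * (m + 1) := by positivity
  nlinarith [h2]

theorem runB_nil (nums : List Int) (last : PySem.Dict Int Int) (depth : Nat) :
    ∀ (f : Nat), fsrB_run nums last depth f [] = none := by
  intro f
  match f with
  | 0 => rw [fsrB_run]
  | f + 1 => rw [fsrB_run]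

-- Main invariant: with enough fuel, the iterative loop computes fsrG.
theorem runB_eq (nums : List Int) (quantity : Int) (hq : 2 ≤ quantity) :
    ∀ (fuel : Nat) (S : List (Nat × Int)), fsrWF nums S →
      (nums.length + 1) ^ nums.length + 1 ≤ fuel + fsrRank nums.length S →
      fsrB_run nums (fsrB_lastIdx nums) (quantity - 1).toNat fuel S = fsrG nums quantity S := by
  intro fuel
  induction fuel with
  | zero =>
    intro S hWF hF
    have := fsrRank_lt nums S hWF
    omega
  | succ fuel ih =>
    intro S hWF hF
    match S with
    | [] => rw [fsrB_run, fsrG]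
    | (i, rem) :: rest =>
      rw [fsrB_run]
      have hiB : i + 1 ≤ nums.length := hWF.2 (i, rem) (by simp)
      by_cases h1 : nums.length ≤ i + 1
      · -- pop: the top frame's loop is exhausted
        rw [if_pos h1]
        have hnone : fsrLoopS (nums.drop i) rem (quantity - rest.length) = none :=
          drop_short nums i (by omega) _ _
        rw [fsrG, hnone]
        match rest with
        | [] => rw [fsrB_pop, runB_nil, fsrComb]
        | (j, s) :: rest' =>
          rw [fsrB_pop]
          have hWF' : fsrWF nums ((j + 1, s) :: rest') := by
            obtain ⟨hp, hb⟩ := hWF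
            have hji : j < i := (List.pairwise_cons.mp hp).1 (j, s) (by simp)
            have hpt := (List.pairwise_cons.mp hp).2
            constructor
            · rw [List.pairwise_cons] at hpt ⊢
              exact ⟨fun f hf => by have := hpt.1 f hf; omega, hpt.2⟩
            · intro f hf
              simp at hf
              rcases hf with hf | hf
              · subst hf; simp; omega
              · exact hb f (by simp [hf])
          have hLb : rest'.length + 2 ≤ nums.length := by
            have := fsrLen nums ((i, rem) :: (j, s) :: rest') hWF
            simp at this; omega
          rw [ih _ hWF' (by have := rank_step_pop nums.length i j rem s rest' hiB hLb; omega)]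
          rw [fsrComb, fsrG]
      · -- the top frame's index is live
        rw [if_neg h1]
        have hi : i < nums.length := by omega
        have hi1 : i + 1 < nums.length := by omega
        have hv : nums.getD i 0 = nums[i] := List.getD_eq_getElem nums 0 hi
        have hd : nums.drop i = nums[i] :: nums.drop (i + 1) := List.drop_eq_getElem_cons hi
        have hd2 : nums.drop (i + 1) = nums[i + 1] :: nums.drop (i + 2) := List.drop_eq_getElem_cons hi1
        have hGS : fsrG nums quantity ((i, rem) :: rest)
            = fsrComb nums quantity (fsrLoopS (nums.drop i) rem (quantity - rest.length)) rest := by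
          rw [fsrG]
        have hLoop : fsrLoopS (nums.drop i) rem (quantity - rest.length)
            = if nums[i] > rem then fsrLoopS (nums.drop (i + 1)) rem (quantity - rest.length)
              else
                match fsrSpec (nums.drop (i + 1)) (rem - nums[i]) (quantity - rest.length - 1) with
                | some m => some (m ++ [nums[i]])
                | none => fsrLoopS (nums.drop (i + 1)) rem (quantity - rest.length) := by
          rw [hd, hd2, fsrLoopS, ← hd2]
        have hWFi : fsrWF nums ((i + 1, rem) :: rest) := by
          obtain ⟨hp, hb⟩ := hWF
          rw [List.pairwise_cons] at hp
          refine ⟨List.pairwise_cons.mpr ⟨fun f hf => by have := hp.1 f hf; omega, hp.2⟩, ?_⟩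
          intro f hf
          simp at hf
          rcases hf with hf | hf
          · subst hf; simp; omega
          · exact hb f (by simp [hf])
        have hFi : (nums.length + 1) ^ nums.length + 1 ≤ fuel + fsrRank nums.length ((i + 1, rem) :: rest) := by
          have := rank_step_incr nums.length i rem rest; omega
        by_cases h2 : nums.getD i 0 > rem
        · -- prune
          rw [if_pos h2]
          rw [ih _ hWFi hFi, hGS, hLoop, if_pos (hv ▸ h2), fsrG]
        · rw [if_neg h2]
          have h2' : ¬ nums[i] > rem := hv ▸ h2
          by_cases h3 : rest.length + 1 = (quantity - 1).toNat
          · -- deepest pick level: hash-lookup base test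
            rw [if_pos h3]
            have hq1 : quantity - rest.length - 1 = 1 := by
              have : ((quantity - 1).toNat : Int) = quantity - 1 := Int.toNat_of_nonneg (by omega)
              omega
            have hspec : fsrSpec (nums.drop (i + 1)) (rem - nums[i]) (quantity - rest.length - 1)
                = if (rem - nums[i]) ∈ nums.drop (i + 1) then some [rem - nums[i]] else none := by
              rw [fsrSpec, if_pos hq1]
            by_cases h4 : (i : Int) < (fsrB_lastIdx nums).getD (rem - nums.getD i 0) (-1)
            · rw [if_pos h4]
              have hmem : (rem - nums[i]) ∈ nums.drop (i + 1) := by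
                have := (lastIdx_gt nums (rem - nums.getD i 0) i).mp h4
                rwa [hv] at this
              rw [hGS, hLoop, if_neg h2', hspec, if_pos hmem, comb_some]
              simp [List.getElem?_eq_getElem hi]
            · rw [if_neg h4]
              have hmem : ¬ (rem - nums[i]) ∈ nums.drop (i + 1) := by
                intro hm
                exact h4 ((lastIdx_gt nums (rem - nums.getD i 0) i).mpr (by rwa [hv]))
              rw [ih _ hWFi hFi, hGS, hLoop, if_neg h2', hspec, if_neg hmem, fsrG]
          · -- descend: push a child frame
            rw [if_neg h3]
            have hq1 : ¬ (quantity - rest.length - 1 = 1) := by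
              have : ((quantity - 1).toNat : Int) = quantity - 1 := Int.toNat_of_nonneg (by omega)
              intro hc
              apply h3
              omega
            have hspec : fsrSpec (nums.drop (i + 1)) (rem - nums[i]) (quantity - rest.length - 1)
                = fsrLoopS (nums.drop (i + 1)) (rem - nums[i]) (quantity - rest.length - 1) := by
              rw [fsrSpec, if_neg hq1]
            have hWFp : fsrWF nums ((i + 1, rem - nums.getD i 0) :: (i, rem) :: rest) := by
              obtain ⟨hp, hb⟩ := hWF
              constructor
              · rw [List.pairwise_cons]
                refine ⟨?_, hp⟩
                intro f hf
                simp at hf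
                rcases hf with hf | hf
                · subst hf; simp
                · have := (List.pairwise_cons.mp hp).1 f hf; omega
              · intro f hf
                simp at hf
                rcases hf with hf | hf | hf
                · subst hf; simp; omega
                · subst hf; simpa using hiB
                · exact hb f (by simp [hf])
            have hLb : rest.length + 2 ≤ nums.length := by
              have := fsrLen nums ((i + 1, rem - nums.getD i 0) :: (i, rem) :: rest) hWFp
              simp at this; omega
            have hFp : (nums.length + 1) ^ nums.length + 1
                ≤ fuel + fsrRank nums.length ((i + 1, rem - nums.getD i 0) :: (i, rem) :: rest) := by
              have := rank_step_push nums.length i rem (rem - nums.getD i 0) rest hLb; omega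
            rw [ih _ hWFp hFp, hGS, hLoop, if_neg h2']
            rw [fsrG]
            have hql : quantity - (((i, rem) :: rest).length : Nat) = quantity - rest.length - 1 := by
              simp; omega
            rw [hql, hv]
            rcases hX : fsrLoopS (nums.drop (i + 1)) (rem - nums[i]) (quantity - rest.length - 1) with _ | ms
            · rw [hspec, hX, fsrComb]
            · rw [hspec, hX, fsrComb, comb_some, comb_some]
              simp [List.getElem?_eq_getElem hi]

-- Sufficient fuel.
theorem fuel_big (n : Nat) : (n + 1) ^ n + 1 ≤ (n + 2) ^ (n + 2) := by
  have h1 : (n + 1) ^ n ≤ (n + 2) ^ n := Nat.pow_le_pow_left (by omega) n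
  have h2 : (n + 2) ^ (n + 2) = (n + 2) ^ n * (n + 2) ^ 2 := by rw [← pow_add]
  have h3 : (1:Nat) ≤ (n + 2) ^ n := Nat.one_le_pow _ _ (by omega)
  have h4 : (n + 2) ^ n * 4 ≤ (n + 2) ^ n * (n + 2) ^ 2 := by
    apply Nat.mul_le_mul_left
    have : (2:Nat) ^ 2 ≤ (n + 2) ^ 2 := Nat.pow_le_pow_left (by omega) 2
    omega
  linarith

theorem B_eq_spec (nums : List Int) (t q : Int) :
    find_sum_recursive_alt nums t q = fsrSpec nums t q := by
  unfold find_sum_recursive_alt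
  by_cases hq1 : q = 1
  · rw [if_pos hq1, fsrSpec, if_pos hq1]
    by_cases hm : t ∈ nums
    · rw [if_pos ((lastIdx_contains nums t).mpr hm), if_pos hm]
    · rw [if_neg (fun hc => hm ((lastIdx_contains nums t).mp hc)), if_neg hm]
  · rw [if_neg hq1, fsrSpec, if_neg hq1]
    by_cases hq0 : q < 1
    · rw [if_pos hq0, loopS_nonpos nums.length nums (by omega) t q hq0]
    · rw [if_neg hq0]
      have hq2 : 2 ≤ q := by omega
      match hnn : nums with
      | [] =>
        rw [fsrLoopS]
        show fsrB_run [] _ _ (3 + 1) [(0, t)] = none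
        rw [fsrB_run]
        simp [fsrB_pop, runB_nil]
      | a :: l =>
        rw [runB_eq (a :: l) q hq2 _ [(0, t)]
          ⟨by simp, by intro f hf; simp at hf; subst hf; simp⟩
          (by have h1 := fuel_big ((a :: l).length)
              have h2 : (0:Nat) ≤ fsrRank (a :: l).length [(0, t)] := Nat.zero_le _
              omega)]
        rw [fsrG, fsrComb]
        simp

-- ===== VERDICT (by name: the statement is the Claim_ definition above) =====
theorem find_sum_recursive_spec : Claim_equal_find_sum_recursive := by
  intro nums target quantity _
  unfold Spec_find_sum_recursive
  rw [A_eq_spec, B_eq_spec]
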